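-- pv_equiv track=rewrite | github.com/chande-dhanush/Sakura | backend/observability/dashboard.py | get_phase_events
-- ===== SOURCE A (Python) =====
-- from collections import defaultdict
--
-- def get_phase_events(events: list) -> dict:
--     """Group events by phase (Router, Executor, Responder)."""
--     phases = defaultdict(list)
--     for event in events:
--         if event.get('event') in ['trace_start', 'trace_end']:
--             continue
--         stage = event.get('stage', 'Other')
--         phases[stage].append(event)
--     return dict(phases)
-- ===== SOURCE B (Python) =====
-- def get_phase_events(events: list) -> dict:
--     """Group events by phase (Router, Executor, Responder)."""
--     kept = [e for e in events if e.get('event') not in ('trace_start', 'trace_end')]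
--     stages = list(dict.fromkeys(e.get('stage', 'Other') for e in kept))
--     return {s: [e for e in kept if e.get('stage', 'Other') == s] for s in stages}
-- ===== Notes on version B (the rewrite author's own statement) =====
-- stated objective: alternative
-- what changed: Replaces the single defaultdict-bucketing pass with a filter of trace markers, an ordered dedup of the stage keys, and one per-stage filtering scan building each bucket.
import Mathlib
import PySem

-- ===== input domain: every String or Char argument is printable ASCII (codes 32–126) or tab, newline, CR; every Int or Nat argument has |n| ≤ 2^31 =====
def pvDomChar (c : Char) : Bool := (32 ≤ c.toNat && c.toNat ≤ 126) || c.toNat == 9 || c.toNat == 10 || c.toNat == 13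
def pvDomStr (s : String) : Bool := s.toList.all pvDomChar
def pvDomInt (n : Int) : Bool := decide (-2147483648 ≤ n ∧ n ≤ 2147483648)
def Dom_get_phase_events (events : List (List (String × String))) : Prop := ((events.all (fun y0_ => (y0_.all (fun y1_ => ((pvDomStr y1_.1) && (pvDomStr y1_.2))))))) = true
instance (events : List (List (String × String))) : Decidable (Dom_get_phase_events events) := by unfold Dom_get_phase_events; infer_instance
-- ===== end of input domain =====

-- B replaces A's single defaultdict-bucketing pass by filter → ordered dedup of stage keys →
-- one per-stage filtering scan (alternative decomposition, same results including key order).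


-- shared primitive: Python `event.get(k)` on an event dict (first match)
def eventGet (e : List (String × String)) (k : String) : Option String :=
  (PySem.Dict.mk e).get? k

-- ===== PORT A =====
-- for event in events: skip trace markers; phases[stage].append(event)  (defaultdict(list)); return dict(phases)
def get_phase_events (events : List (List (String × String))) : List (String × List (List (String × String))) :=
  (events.foldl
    (fun (phases : PySem.Dict String (List (List (String × String)))) event =>
      if eventGet event "event" ∈ [some "trace_start", some "trace_end"] then phases
      else
        let stage := (eventGet event "stage").getD "Other"
        phases.modify stage [] (· ++ [event]))
    PySem.Dict.empty).items

-- ===== PORT B =====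
def get_phase_events_alt (events : List (List (String × String))) : List (String × List (List (String × String))) :=
  let kept := events.filter
    (fun e => !(decide (eventGet e "event" ∈ [some "trace_start", some "trace_end"])))
  let stages := PySem.List.dedup (kept.map (fun e => (eventGet e "stage").getD "Other"))
  stages.map (fun s => (s, kept.filter (fun e => (eventGet e "stage").getD "Other" == s)))

-- ===== PRECONDITION & SPEC =====
def Spec_get_phase_events (events : List (List (String × String))) (out : List (String × List (List (String × String)))) : Prop := out = get_phase_events_alt events
instance (events : List (List (String × String))) (out : List (String × List (List (String × String)))) : Decidable (Spec_get_phase_events events out) := by unfold Spec_get_phase_events; infer_instance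

-- ===== CLAIM (what is proved, stated in full; the proofs are below) =====
def Claim_equal_get_phase_events : Prop := ∀ (events : List (List (String × String))), Dom_get_phase_events events → Spec_get_phase_events events (get_phase_events events)

-- ===== LEMMAS AND PROOFS =====

-- abbreviations for the proof
def pvKey (e : List (String × String)) : String := (eventGet e "stage").getD "Other"
def pvKeep (e : List (String × String)) : Bool :=
  !(decide (eventGet e "event" ∈ [some "trace_start", some "trace_end"]))

-- A's guarded loop is the unguarded loop over the kept events
theorem pv_foldl_skip (l : List (List (String × String)))
    (d : PySem.Dict String (List (List (String × String)))) :
    l.foldl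
      (fun phases event =>
        if eventGet event "event" ∈ [some "trace_start", some "trace_end"] then phases
        else phases.modify (pvKey event) [] (· ++ [event])) d
    = (l.filter pvKeep).foldl (fun phases event => phases.modify (pvKey event) [] (· ++ [event])) d := by
  induction l generalizing d with
  | nil => rfl
  | cons e t ih =>
    rw [List.foldl_cons, List.filter_cons]
    by_cases h : eventGet e "event" ∈ [some "trace_start", some "trace_end"]
    · rw [if_pos h]
      have hk : pvKeep e = false := by
        simp only [pvKeep, Bool.not_eq_false', decide_eq_true_eq]; exact h
      rw [hk]
      simp only [Bool.false_eq_true, if_false]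
      exact ih d
    · rw [if_neg h]
      have hk : pvKeep e = true := by
        simp only [pvKeep, Bool.not_eq_true', decide_eq_false_iff_not]; exact h
      rw [hk]
      simp only [if_true]
      exact ih _

theorem get_phase_events_spec : Claim_equal_get_phase_events := by
  unfold Claim_equal_get_phase_events
  intro events _
  unfold Spec_get_phase_events get_phase_events get_phase_events_alt
  have hA : (events.foldl
      (fun (phases : PySem.Dict String (List (List (String × String)))) event =>
        if eventGet event "event" ∈ [some "trace_start", some "trace_end"] then phases
        else
          let stage := (eventGet event "stage").getD "Other"
          phases.modify stage [] (· ++ [event]))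
      PySem.Dict.empty)
      = ((events.filter pvKeep).foldl
          (fun phases event => phases.modify (pvKey event) [] (· ++ [event]))
          PySem.Dict.empty) := pv_foldl_skip events PySem.Dict.empty
  rw [hA]
  set kept := events.filter pvKeep with hkept
  set d := kept.foldl (fun phases event => phases.modify (pvKey event) [] (· ++ [event]))
      PySem.Dict.empty with hd
  have hnd : d.keys.Nodup := by
    rw [hd]
    exact PySem.Dict.nodup_keys_foldl_modify_key kept pvKey []
      (fun phases event => (· ++ [event])) PySem.Dict.empty (by simp)
  have hkeys : d.keys = PySem.List.dedup (kept.map pvKey) := by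
    rw [hd, PySem.Dict.keys_foldl_modify_key]
    simp [PySem.List.dedup_eq_ofList, PySem.Set.update_nil_left]
  have hgetD : ∀ c, d.getD c [] = kept.filter (fun e => pvKey e == c) := by
    intro c
    rw [hd]
    have hm : kept.foldl (fun phases event => phases.modify (pvKey event) [] (· ++ [event]))
        PySem.Dict.empty
        = (kept.map (fun e => (pvKey e, e))).foldl
            (fun phases p => phases.modify p.1 [] (· ++ [p.2])) PySem.Dict.empty := by
      rw [List.foldl_map]
    rw [hm, PySem.Dict.getD_foldl_modify_append]
    simp [List.filter_map, Function.comp_def]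
  rw [PySem.Dict.items_eq_map_keys d hnd [], hkeys]
  refine List.map_congr_left ?_
  intro s _
  rw [hgetD s, hkept, List.filter_filter]
  simp [pvKey, pvKeep]
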